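-- pv_equiv track=rewrite | github.com/pretzel-landslide/RTTY | rtty.py | char_to_integer
-- ===== SOURCE A (Python) =====
-- LETTER = 0
--
-- FIGURE = 1
--
-- ERROR = 2
--
-- codes = [
--     ['NUL', 'NUL'],
--     ['E', '3'],
--     ['\n', '\n'],
--     ['A', '-'],
--     [' ', ' '],
--     ['S', '\''],
--     ['I', '8'],
--     ['U', '7'],
--     ['\r', '\r'],
--     ['D', 'enq'],
--     ['R', '4'],
--     ['J', 'bel'],
--     ['N', ','],
--     ['F', '!'],
--     ['C', ':'],
--     ['K', '('],
--     ['T', '5'],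
--     ['Z', '+'],
--     ['L', ')'],
--     ['W', '2'],
--     ['H', 'pounds'],
--     ['Y', '6'],
--     ['P', '0'],
--     ['Q', '1'],
--     ['O', '9'],
--     ['B', '?'],
--     ['G', '&'],
--     ['fs', 'fs'],
--     ['M', '.'],
--     ['X', '/'],
--     ['V', '='],
--     ['ls', 'ls']
-- ]
--
-- def char_to_integer(char, current_code_type):
--     for i in range(len(codes)):
--         if codes[i][current_code_type] == char:
--             return [i, current_code_type]
--
--     if current_code_type == LETTER:
--         next_code_type = FIGURE
--     else:
--         next_code_type = LETTER
--
--     for i in range(len(codes)):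
--         if codes[i][next_code_type] == char:
--             return [i, next_code_type]
--
--     return [0, ERROR]
-- ===== SOURCE B (Python) =====
-- # Single-pass re-implementation: one loop over the table checks both columns at once,
-- # returning on a primary-column hit and remembering the first other-column hit as fallback.
-- LETTER = 0
--
-- FIGURE = 1
--
-- ERROR = 2
--
-- codes = [
--     ['NUL', 'NUL'],
--     ['E', '3'],
--     ['\n', '\n'],
--     ['A', '-'],
--     [' ', ' '],
--     ['S', '\''],
--     ['I', '8'],
--     ['U', '7'],
--     ['\r', '\r'],
--     ['D', 'enq'],
--     ['R', '4'],
--     ['J', 'bel'],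
--     ['N', ','],
--     ['F', '!'],
--     ['C', ':'],
--     ['K', '('],
--     ['T', '5'],
--     ['Z', '+'],
--     ['L', ')'],
--     ['W', '2'],
--     ['H', 'pounds'],
--     ['Y', '6'],
--     ['P', '0'],
--     ['Q', '1'],
--     ['O', '9'],
--     ['B', '?'],
--     ['G', '&'],
--     ['fs', 'fs'],
--     ['M', '.'],
--     ['X', '/'],
--     ['V', '='],
--     ['ls', 'ls']
-- ]
--
-- def char_to_integer(char, current_code_type):
--     other = FIGURE if current_code_type == LETTER else LETTER
--     fallback = None
--     for i, row in enumerate(codes):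
--         if row[current_code_type] == char:
--             return [i, current_code_type]
--         if fallback is None and row[other] == char:
--             fallback = i
--     return [fallback, other] if fallback is not None else [0, ERROR]
-- ===== Notes on version B (the rewrite author's own statement) =====
-- stated objective: alternative
-- what changed: A's two staged linear scans (primary column, then fallback column) are replaced by a single pass over the table that checks both columns of each row at once, returning early on a primary hit and carrying the first other-column hit in an accumulator.
import Mathlib
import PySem

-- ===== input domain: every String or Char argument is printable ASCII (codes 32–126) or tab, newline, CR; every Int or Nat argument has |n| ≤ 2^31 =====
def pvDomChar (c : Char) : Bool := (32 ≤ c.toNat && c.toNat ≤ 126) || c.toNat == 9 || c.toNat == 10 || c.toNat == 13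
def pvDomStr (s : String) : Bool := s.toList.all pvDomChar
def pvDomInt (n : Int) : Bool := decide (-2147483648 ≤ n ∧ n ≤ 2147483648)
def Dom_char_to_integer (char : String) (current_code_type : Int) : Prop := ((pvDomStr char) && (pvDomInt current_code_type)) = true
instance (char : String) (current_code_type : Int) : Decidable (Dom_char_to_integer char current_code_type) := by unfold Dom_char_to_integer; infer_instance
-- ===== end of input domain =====

-- B replaces A's two staged linear scans with ONE pass over the table that checks both
-- columns of each row, returning early on a primary hit and keeping the first
-- other-column hit as a fallback accumulator (objective: alternative structure).

-- the module-level Baudot table, shared data of both programs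
def codes : List (List String) :=
  [["NUL", "NUL"], ["E", "3"], ["\n", "\n"], ["A", "-"], [" ", " "],
   ["S", "'"], ["I", "8"], ["U", "7"], ["\r", "\r"], ["D", "enq"],
   ["R", "4"], ["J", "bel"], ["N", ","], ["F", "!"], ["C", ":"],
   ["K", "("], ["T", "5"], ["Z", "+"], ["L", ")"], ["W", "2"],
   ["H", "pounds"], ["Y", "6"], ["P", "0"], ["Q", "1"], ["O", "9"],
   ["B", "?"], ["G", "&"], ["fs", "fs"], ["M", "."], ["X", "/"],
   ["V", "="], ["ls", "ls"]]

-- ===== PORT A =====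
-- 'for i in range(len(codes)): if codes[i][col] == char: return [i, …]'
-- codes[i][col] raises IndexError for col outside {-2,-1,0,1}; those inputs are outside Pre_
def scanA (char : String) (col : Int) : List Int → Option Int
  | [] => none
  | i :: rest =>
    if ((PySem.List.pyGet? codes i).bind (fun row => PySem.List.pyGet? row col)) = some char
    then some i else scanA char col rest

def char_to_integer (char : String) (current_code_type : Int) : List Int :=
  match scanA char current_code_type (PySem.List.pyRange 0 (codes.length : Int) 1) with
  | some i => [i, current_code_type]
  | none =>
    let next_code_type : Int := if current_code_type = 0 then 1 else 0
    match scanA char next_code_type (PySem.List.pyRange 0 (codes.length : Int) 1) with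
    | some i => [i, next_code_type]
    | none => [0, 2]

-- ===== PORT B =====
-- 'for i, row in enumerate(codes): if row[cct]==char: return [i,cct];
--  if fallback is None and row[other]==char: fallback = i' then the final return
def loopB (char : String) (cct other : Int) : List (Int × List String) → Option Int → List Int
  | [], fb => match fb with
    | some j => [j, other]
    | none => [0, 2]
  | (i, row) :: rest, fb =>
    if PySem.List.pyGet? row cct = some char then [i, cct]
    else loopB char cct other rest
      (match fb with
       | none => if PySem.List.pyGet? row other = some char then some i else none
       | some j => some j)

def char_to_integer_alt (char : String) (current_code_type : Int) : List Int :=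
  let other : Int := if current_code_type = 0 then 1 else 0
  loopB char current_code_type other (PySem.List.enumerate codes) none

-- ===== PRECONDITION & SPEC =====
-- Pre_ excludes exactly the code types outside {-2,-1,0,1}, on which A raises IndexError
def Pre_char_to_integer (char : String) (current_code_type : Int) : Prop :=
  -2 ≤ current_code_type ∧ current_code_type ≤ 1
instance (char : String) (current_code_type : Int) : Decidable (Pre_char_to_integer char current_code_type) := by unfold Pre_char_to_integer; infer_instance

def pvWitness_char_to_integer : String × Int := ("A", 0)

def Spec_char_to_integer (char : String) (current_code_type : Int) (out : List Int) : Prop := out = char_to_integer_alt char current_code_type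
instance (char : String) (current_code_type : Int) (out : List Int) : Decidable (Spec_char_to_integer char current_code_type out) := by unfold Spec_char_to_integer; infer_instance

-- ===== CLAIM =====
def Claim_equal_char_to_integer : Prop := ∀ (char : String) (current_code_type : Int), Dom_char_to_integer char current_code_type → Pre_char_to_integer char current_code_type → Spec_char_to_integer char current_code_type (char_to_integer char current_code_type)

-- ===== LEMMAS AND PROOFS =====

-- the first row index (from an enumerated row list) whose column c holds char
def scanPairs (char : String) (c : Int) : List (Int × List String) → Option Int
  | [] => none
  | (i, row) :: rest =>
    if PySem.List.pyGet? row c = some char then some i else scanPairs char c rest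

-- B's single pass equals A's two staged scans over the same enumerated rows
theorem loopB_eq_twoPhase (char : String) (cA cO : Int)
    (l : List (Int × List String)) (fb : Option Int) :
    loopB char cA cO l fb =
      match scanPairs char cA l with
      | some i => [i, cA]
      | none => match fb with
        | some j => [j, cO]
        | none => match scanPairs char cO l with
          | some i => [i, cO]
          | none => [0, 2] := by
  induction l generalizing fb with
  | nil => cases fb <;> simp [loopB, scanPairs]
  | cons p rest ih =>
    obtain ⟨i, row⟩ := p
    by_cases hA : PySem.List.pyGet? row cA = some char
    · simp [loopB, scanPairs, hA]
    · cases fb with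
      | some j => simp [loopB, scanPairs, hA, ih]
      | none =>
        by_cases hO : PySem.List.pyGet? row cO = some char
        · simp [loopB, scanPairs, hA, hO, ih]
        · simp [loopB, scanPairs, hA, hO, ih]

-- the concrete range of row indices and the enumerated table, evaluated once
theorem pyRange_codes : PySem.List.pyRange 0 (codes.length : Int) 1 = [0, 1, 2, 3, 4, 5, 6, 7, 8, 9, 10, 11, 12, 13, 14, 15, 16, 17, 18, 19, 20, 21, 22, 23, 24, 25, 26, 27, 28, 29, 30, 31] := by decide
theorem enumerate_codes : PySem.List.enumerate codes = [((0 : Int), ["NUL", "NUL"]), ((1 : Int), ["E", "3"]), ((2 : Int), ["\n", "\n"]), ((3 : Int), ["A", "-"]), ((4 : Int), [" ", " "]), ((5 : Int), ["S", "'"]), ((6 : Int), ["I", "8"]), ((7 : Int), ["U", "7"]), ((8 : Int), ["\r", "\r"]), ((9 : Int), ["D", "enq"]), ((10 : Int), ["R", "4"]), ((11 : Int), ["J", "bel"]), ((12 : Int), ["N", ","]), ((13 : Int), ["F", "!"]), ((14 : Int), ["C", ":"]), ((15 : Int), ["K", "("]), ((16 : Int), ["T", "5"]), ((17 : Int), ["Z",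 "+"]), ((18 : Int), ["L", ")"]), ((19 : Int), ["W", "2"]), ((20 : Int), ["H", "pounds"]), ((21 : Int), ["Y", "6"]), ((22 : Int), ["P", "0"]), ((23 : Int), ["Q", "1"]), ((24 : Int), ["O", "9"]), ((25 : Int), ["B", "?"]), ((26 : Int), ["G", "&"]), ((27 : Int), ["fs", "fs"]), ((28 : Int), ["M", "."]), ((29 : Int), ["X", "/"]), ((30 : Int), ["V", "="]), ((31 : Int), ["ls", "ls"])] := by decide

-- binding a known some just applies the function
theorem some_bind_eq {A B : Type} (a : A) (f : A -> Option B) : (some a).bind f = f a := rfl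

-- Python column access on a two-entry row: 0 and -2 read the first entry, 1 and -1 the second
theorem col0 (a b : String) : PySem.List.pyGet? [a, b] (0 : Int) = some a := rfl
theorem col1 (a b : String) : PySem.List.pyGet? [a, b] (1 : Int) = some b := rfl
theorem colneg2 (a b : String) : PySem.List.pyGet? [a, b] (-2 : Int) = some a := rfl
theorem colneg1 (a b : String) : PySem.List.pyGet? [a, b] (-1 : Int) = some b := rfl

-- each row of the table, fetched by its Python index
theorem codes_get_0 : PySem.List.pyGet? codes (0 : Int) = some ["NUL", "NUL"] := by decide
theorem codes_get_1 : PySem.List.pyGet? codes (1 : Int) = some ["E", "3"] := by decide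
theorem codes_get_2 : PySem.List.pyGet? codes (2 : Int) = some ["\n", "\n"] := by decide
theorem codes_get_3 : PySem.List.pyGet? codes (3 : Int) = some ["A", "-"] := by decide
theorem codes_get_4 : PySem.List.pyGet? codes (4 : Int) = some [" ", " "] := by decide
theorem codes_get_5 : PySem.List.pyGet? codes (5 : Int) = some ["S", "'"] := by decide
theorem codes_get_6 : PySem.List.pyGet? codes (6 : Int) = some ["I", "8"] := by decide
theorem codes_get_7 : PySem.List.pyGet? codes (7 : Int) = some ["U", "7"] := by decide
theorem codes_get_8 : PySem.List.pyGet? codes (8 : Int) = some ["\r", "\r"] := by decide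
theorem codes_get_9 : PySem.List.pyGet? codes (9 : Int) = some ["D", "enq"] := by decide
theorem codes_get_10 : PySem.List.pyGet? codes (10 : Int) = some ["R", "4"] := by decide
theorem codes_get_11 : PySem.List.pyGet? codes (11 : Int) = some ["J", "bel"] := by decide
theorem codes_get_12 : PySem.List.pyGet? codes (12 : Int) = some ["N", ","] := by decide
theorem codes_get_13 : PySem.List.pyGet? codes (13 : Int) = some ["F", "!"] := by decide
theorem codes_get_14 : PySem.List.pyGet? codes (14 : Int) = some ["C", ":"] := by decide
theorem codes_get_15 : PySem.List.pyGet? codes (15 : Int) = some ["K", "("] := by decide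
theorem codes_get_16 : PySem.List.pyGet? codes (16 : Int) = some ["T", "5"] := by decide
theorem codes_get_17 : PySem.List.pyGet? codes (17 : Int) = some ["Z", "+"] := by decide
theorem codes_get_18 : PySem.List.pyGet? codes (18 : Int) = some ["L", ")"] := by decide
theorem codes_get_19 : PySem.List.pyGet? codes (19 : Int) = some ["W", "2"] := by decide
theorem codes_get_20 : PySem.List.pyGet? codes (20 : Int) = some ["H", "pounds"] := by decide
theorem codes_get_21 : PySem.List.pyGet? codes (21 : Int) = some ["Y", "6"] := by decide
theorem codes_get_22 : PySem.List.pyGet? codes (22 : Int) = some ["P", "0"] := by decide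
theorem codes_get_23 : PySem.List.pyGet? codes (23 : Int) = some ["Q", "1"] := by decide
theorem codes_get_24 : PySem.List.pyGet? codes (24 : Int) = some ["O", "9"] := by decide
theorem codes_get_25 : PySem.List.pyGet? codes (25 : Int) = some ["B", "?"] := by decide
theorem codes_get_26 : PySem.List.pyGet? codes (26 : Int) = some ["G", "&"] := by decide
theorem codes_get_27 : PySem.List.pyGet? codes (27 : Int) = some ["fs", "fs"] := by decide
theorem codes_get_28 : PySem.List.pyGet? codes (28 : Int) = some ["M", "."] := by decide
theorem codes_get_29 : PySem.List.pyGet? codes (29 : Int) = some ["X", "/"] := by decide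
theorem codes_get_30 : PySem.List.pyGet? codes (30 : Int) = some ["V", "="] := by decide
theorem codes_get_31 : PySem.List.pyGet? codes (31 : Int) = some ["ls", "ls"] := by decide

-- A's index scan of each concrete column equals the scan over the enumerated rows
theorem scanA_eq_0 (char : String) :
    scanA char (0) (PySem.List.pyRange 0 (codes.length : Int) 1)
      = scanPairs char (0) (PySem.List.enumerate codes) := by
  rw [pyRange_codes, enumerate_codes]
  simp only [scanA, scanPairs, codes_get_0, codes_get_1, codes_get_2, codes_get_3, codes_get_4, codes_get_5, codes_get_6, codes_get_7, codes_get_8, codes_get_9, codes_get_10, codes_get_11, codes_get_12, codes_get_13, codes_get_14, codes_get_15, codes_get_16, codes_get_17, codes_get_18, codes_get_19, codes_get_20, codes_get_21, codes_get_22, codes_get_23, codes_get_24, codes_get_25, codes_get_26, codes_get_27, codes_get_28, codes_get_29, codes_get_30, codes_get_31, some_bind_eq, col0]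

theorem scanA_eq_1 (char : String) :
    scanA char (1) (PySem.List.pyRange 0 (codes.length : Int) 1)
      = scanPairs char (1) (PySem.List.enumerate codes) := by
  rw [pyRange_codes, enumerate_codes]
  simp only [scanA, scanPairs, codes_get_0, codes_get_1, codes_get_2, codes_get_3, codes_get_4, codes_get_5, codes_get_6, codes_get_7, codes_get_8, codes_get_9, codes_get_10, codes_get_11, codes_get_12, codes_get_13, codes_get_14, codes_get_15, codes_get_16, codes_get_17, codes_get_18, codes_get_19, codes_get_20, codes_get_21, codes_get_22, codes_get_23, codes_get_24, codes_get_25, codes_get_26, codes_get_27, codes_get_28, codes_get_29, codes_get_30, codes_get_31, some_bind_eq, col1]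

theorem scanA_eq_neg2 (char : String) :
    scanA char (-2) (PySem.List.pyRange 0 (codes.length : Int) 1)
      = scanPairs char (-2) (PySem.List.enumerate codes) := by
  rw [pyRange_codes, enumerate_codes]
  simp only [scanA, scanPairs, codes_get_0, codes_get_1, codes_get_2, codes_get_3, codes_get_4, codes_get_5, codes_get_6, codes_get_7, codes_get_8, codes_get_9, codes_get_10, codes_get_11, codes_get_12, codes_get_13, codes_get_14, codes_get_15, codes_get_16, codes_get_17, codes_get_18, codes_get_19, codes_get_20, codes_get_21, codes_get_22, codes_get_23, codes_get_24, codes_get_25, codes_get_26, codes_get_27, codes_get_28, codes_get_29, codes_get_30, codes_get_31, some_bind_eq, colneg2]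

theorem scanA_eq_neg1 (char : String) :
    scanA char (-1) (PySem.List.pyRange 0 (codes.length : Int) 1)
      = scanPairs char (-1) (PySem.List.enumerate codes) := by
  rw [pyRange_codes, enumerate_codes]
  simp only [scanA, scanPairs, codes_get_0, codes_get_1, codes_get_2, codes_get_3, codes_get_4, codes_get_5, codes_get_6, codes_get_7, codes_get_8, codes_get_9, codes_get_10, codes_get_11, codes_get_12, codes_get_13, codes_get_14, codes_get_15, codes_get_16, codes_get_17, codes_get_18, codes_get_19, codes_get_20, codes_get_21, codes_get_22, codes_get_23, codes_get_24, codes_get_25, codes_get_26, codes_get_27, codes_get_28, codes_get_29, codes_get_30, codes_get_31, some_bind_eq, colneg1]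

-- columns -2 and 0 (resp. -1 and 1) of every row agree, so the scans agree
theorem scanPairs_neg2 (char : String) :
    scanPairs char (-2) (PySem.List.enumerate codes)
      = scanPairs char 0 (PySem.List.enumerate codes) := by
  rw [enumerate_codes]
  simp only [scanPairs, colneg2, col0]

theorem scanPairs_neg1 (char : String) :
    scanPairs char (-1) (PySem.List.enumerate codes)
      = scanPairs char 1 (PySem.List.enumerate codes) := by
  rw [enumerate_codes]
  simp only [scanPairs, colneg1, col1]

-- ===== VERDICT =====
theorem char_to_integer_spec : Claim_equal_char_to_integer := by
  intro char cct _ hpre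
  unfold Spec_char_to_integer
  obtain ⟨h1, h2⟩ := hpre
  have hc : cct = -2 ∨ cct = -1 ∨ cct = 0 ∨ cct = 1 := by omega
  rcases hc with rfl | rfl | rfl | rfl
  · simp only [char_to_integer, char_to_integer_alt,
      show (if (-2 : Int) = 0 then (1 : Int) else 0) = 0 by decide,
      loopB_eq_twoPhase, scanA_eq_neg2, scanA_eq_0, scanPairs_neg2]
  · simp only [char_to_integer, char_to_integer_alt,
      show (if (-1 : Int) = 0 then (1 : Int) else 0) = 0 by decide,
      loopB_eq_twoPhase, scanA_eq_neg1, scanA_eq_0, scanPairs_neg1]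
  · simp only [char_to_integer, char_to_integer_alt,
      if_true,
      loopB_eq_twoPhase, scanA_eq_0, scanA_eq_1]
  · simp only [char_to_integer, char_to_integer_alt,
      show (if (1 : Int) = 0 then (1 : Int) else 0) = 0 by decide,
      loopB_eq_twoPhase, scanA_eq_1, scanA_eq_0]
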